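-- pv_equiv track=rewrite | github.com/comboaiii/heartlib-infinite-Aisongs-with-feedback-gui-lmStudio- | GROUND_TRUTH_ComboAi/AGANCY/EnhancedModelScanner.py | estimate_size
-- ===== SOURCE A (Python) =====
-- def estimate_size(model_id: str) -> str:
--     """Estimate model size from name"""
--     model_lower = model_id.lower()
--
--     # Look for size indicators
--     if any(x in model_lower for x in ['70b', '72b']):
--         return "~40-50GB"
--     elif any(x in model_lower for x in ['30b', '34b']):
--         return "~20-25GB"
--     elif any(x in model_lower for x in ['13b', '14b']):
--         return "~8-10GB"
--     elif any(x in model_lower for x in ['7b', '8b']):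
--         return "~4-6GB"
--     elif any(x in model_lower for x in ['3b']):
--         return "~2-3GB"
--     elif any(x in model_lower for x in ['1b']):
--         return "~1GB"
--     else:
--         return "Unknown"
-- ===== SOURCE B (Python) =====
-- SIZES = ["~40-50GB", "~20-25GB", "~8-10GB", "~4-6GB", "~2-3GB", "~1GB"]
--
-- def _rank_at(s, i):
--     # rank of the highest-priority size token STARTING at position i (6 = none)
--     t3 = s[i:i+3]
--     if t3 in ('70b', '72b'): return 0
--     if t3 in ('30b', '34b'): return 1
--     if t3 in ('13b', '14b'): return 2
--     t2 = s[i:i+2]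
--     if t2 in ('7b', '8b'): return 3
--     if t2 == '3b': return 4
--     if t2 == '1b': return 5
--     return 6
--
-- def estimate_size(model_id: str) -> str:
--     # single positional scan: classify the token starting at each index,
--     # keep the minimum (best-priority) rank, map it to a size at the end
--     s = model_id.lower()
--     best = 6
--     for i in range(len(s)):
--         r = _rank_at(s, i)
--         if r < best:
--             best = r
--     return SIZES[best] if best < 6 else "Unknown"
-- ===== Notes on version B (the rewrite author's own statement) =====
-- stated objective: alternative
-- what changed: Instead of A's six priority-ordered substring searches over the whole string, B makes one positional scan that classifies the size token starting at each index into a numeric rank, keeps the minimum rank, and maps it to the size label at the end.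
import Mathlib
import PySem

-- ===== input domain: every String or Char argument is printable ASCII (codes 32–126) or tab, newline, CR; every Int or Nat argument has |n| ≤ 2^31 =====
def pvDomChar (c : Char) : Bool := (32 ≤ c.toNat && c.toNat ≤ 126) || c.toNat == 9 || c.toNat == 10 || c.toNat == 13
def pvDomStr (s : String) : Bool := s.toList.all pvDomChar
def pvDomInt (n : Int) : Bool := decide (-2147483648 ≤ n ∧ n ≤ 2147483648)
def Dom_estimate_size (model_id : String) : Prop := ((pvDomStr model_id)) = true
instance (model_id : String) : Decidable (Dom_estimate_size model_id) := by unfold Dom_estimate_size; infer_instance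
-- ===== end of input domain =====

-- B replaces A's six priority-ordered whole-string substring searches by a single
-- positional scan that ranks the token starting at each index and keeps the minimum rank.

-- ===== PORT A =====
def estimate_size (model_id : String) : String :=
  let model_lower := PySem.Str.lower model_id
  if ["70b", "72b"].any (fun x => PySem.Str.isIn x model_lower) then "~40-50GB"
  else if ["30b", "34b"].any (fun x => PySem.Str.isIn x model_lower) then "~20-25GB"
  else if ["13b", "14b"].any (fun x => PySem.Str.isIn x model_lower) then "~8-10GB"
  else if ["7b", "8b"].any (fun x => PySem.Str.isIn x model_lower) then "~4-6GB"
  else if ["3b"].any (fun x => PySem.Str.isIn x model_lower) then "~2-3GB"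
  else if ["1b"].any (fun x => PySem.Str.isIn x model_lower) then "~1GB"
  else "Unknown"

-- ===== PORT B =====
def pvSizes : List String := ["~40-50GB", "~20-25GB", "~8-10GB", "~4-6GB", "~2-3GB", "~1GB"]

-- rank of the size token starting at this suffix (s[i:i+3] = (drop i).take 3)
def rankAt (t : List Char) : Nat :=
  let t3 := t.take 3
  if t3 = ['7','0','b'] ∨ t3 = ['7','2','b'] then 0
  else if t3 = ['3','0','b'] ∨ t3 = ['3','4','b'] then 1
  else if t3 = ['1','3','b'] ∨ t3 = ['1','4','b'] then 2
  else
    let t2 := t.take 2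
    if t2 = ['7','b'] ∨ t2 = ['8','b'] then 3
    else if t2 = ['3','b'] then 4
    else if t2 = ['1','b'] then 5
    else 6

-- the loop over i in range(len(s)), suffix by suffix, with the running best rank
def scanBest : List Char → Nat → Nat
  | [], best => best
  | t :: rest, best =>
      let r := rankAt (t :: rest)
      scanBest rest (if r < best then r else best)

def estimate_size_alt (model_id : String) : String :=
  let s := PySem.Chars.lower model_id.toList
  let best := scanBest s 6
  if best < 6 then pvSizes.getD best "Unknown" else "Unknown"

-- ===== PRECONDITION & SPEC =====
def Spec_estimate_size (model_id : String) (out : String) : Prop := out = estimate_size_alt model_id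
instance (model_id : String) (out : String) : Decidable (Spec_estimate_size model_id out) := by unfold Spec_estimate_size; infer_instance

-- ===== CLAIM (what is proved, stated in full; the proofs are below) =====
def Claim_equal_estimate_size : Prop := ∀ (model_id : String), Dom_estimate_size model_id → Spec_estimate_size model_id (estimate_size model_id)

-- ===== LEMMAS AND PROOFS =====

-- pure minimum rank over all suffixes
def minRank : List Char → Nat
  | [] => 6
  | t :: rest => min (rankAt (t :: rest)) (minRank rest)

theorem rankAt_le_six (t : List Char) : rankAt t ≤ 6 := by
  unfold rankAt; dsimp only; split_ifs <;> omega

theorem scanBest_eq (l : List Char) : ∀ best, best ≤ 6 → scanBest l best = min best (minRank l) := by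
  induction l with
  | nil => intro best hb; simp [scanBest, minRank]; omega
  | cons a rest ih =>
      intro best hb
      have hr := rankAt_le_six (a :: rest)
      simp only [scanBest, minRank]
      rw [ih _ (by split <;> omega)]
      split_ifs <;> omega

theorem minRank_le_drop (l : List Char) : ∀ j, minRank l ≤ rankAt (l.drop j) := by
  induction l with
  | nil => intro j; simp [minRank, rankAt]
  | cons a rest ih =>
      intro j
      cases j with
      | zero => simp [minRank]
      | succ k => simpa [minRank] using Nat.le_trans (Nat.min_le_right _ _) (ih k)

theorem minRank_attained (l : List Char) : minRank l = 6 ∨ ∃ j, rankAt (l.drop j) = minRank l := by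
  induction l with
  | nil => left; rfl
  | cons a rest ih =>
      by_cases h : rankAt (a :: rest) ≤ minRank rest
      · right; exact ⟨0, by simp [minRank, Nat.min_eq_left h]⟩
      · have hmin : minRank (a :: rest) = minRank rest := by
          simp [minRank]; omega
        rcases ih with h6 | ⟨j, hj⟩
        · left; rw [hmin, h6]
        · right; exact ⟨j + 1, by simpa [hmin] using hj⟩

-- prefix characterisation of each rank
theorem rankAt_eq_zero_iff (t : List Char) :
    rankAt t = 0 ↔ (['7','0','b'] <+: t ∨ ['7','2','b'] <+: t) := by
  simp only [List.prefix_iff_eq_take, List.length_cons, List.length_nil]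
  unfold rankAt
  dsimp only
  split_ifs with h1 h2 h3 h4 h5 h6 <;> simp_all [eq_comm]

theorem rankAt_eq_one_iff (t : List Char) :
    rankAt t = 1 ↔ (['3','0','b'] <+: t ∨ ['3','4','b'] <+: t) := by
  simp only [List.prefix_iff_eq_take, List.length_cons, List.length_nil]
  unfold rankAt
  dsimp only
  split_ifs with h1 h2 h3 h4 h5 h6 <;> simp_all [eq_comm] <;>
    constructor <;> intro hc <;>
    rcases h1 with h1 | h1 <;> exact absurd (h1.trans hc.symm) (by decide)

theorem rankAt_eq_two_iff (t : List Char) :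
    rankAt t = 2 ↔ (['1','3','b'] <+: t ∨ ['1','4','b'] <+: t) := by
  simp only [List.prefix_iff_eq_take, List.length_cons, List.length_nil]
  unfold rankAt
  dsimp only
  split_ifs with h1 h2 h3 h4 h5 h6 <;>
    simp_all [eq_comm] <;>
    constructor <;> intro hc <;>
    first
      | (rcases h1 with h1 | h1 <;> exact absurd (h1.trans hc.symm) (by decide))
      | (rcases h2 with h2 | h2 <;> exact absurd (h2.trans hc.symm) (by decide))

theorem take_two_of_take_three {t : List Char} {a b c : Char}
    (h : t.take 3 = [a, b, c]) : t.take 2 = [a, b] := by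
  have := congrArg (List.take 2) h
  simpa [List.take_take] using this

theorem rankAt_eq_three_iff (t : List Char) :
    rankAt t = 3 ↔ (['7','b'] <+: t ∨ ['8','b'] <+: t) := by
  constructor
  · intro h
    unfold rankAt at h
    dsimp only at h
    split_ifs at h with h1 h2 h3 h4 h5 h6 <;> try omega
    simpa [List.prefix_iff_eq_take, eq_comm] using h4
  · intro h
    have h2 : t.take 2 = ['7','b'] ∨ t.take 2 = ['8','b'] := by
      simpa [List.prefix_iff_eq_take, eq_comm] using h
    unfold rankAt
    dsimp only
    split_ifs with h1 hb hc <;> try rfl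
    all_goals {
      exfalso
      rcases h2 with h2 | h2 <;>
        first
        | (rcases h1 with h1 | h1 <;> (have := take_two_of_take_three h1; simp_all))
        | (rcases hb with hb | hb <;> (have := take_two_of_take_three hb; simp_all))
        | (rcases hc with hc | hc <;> (have := take_two_of_take_three hc; simp_all))
        | simp_all }

theorem rankAt_eq_four_iff (t : List Char) :
    rankAt t = 4 ↔ ['3','b'] <+: t := by
  constructor
  · intro h
    unfold rankAt at h
    dsimp only at h
    split_ifs at h with h1 h2 h3 h4 h5 h6 <;> try omega
    simpa [List.prefix_iff_eq_take, eq_comm] using h5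
  · intro h
    have h2 : t.take 2 = ['3','b'] := by
      simpa [List.prefix_iff_eq_take, eq_comm] using h
    unfold rankAt
    dsimp only
    split_ifs with h1 hb hc hd <;> try rfl
    all_goals {
      exfalso
      first
      | (rcases h1 with h1 | h1 <;> (have := take_two_of_take_three h1; simp_all))
      | (rcases hb with hb | hb <;> (have := take_two_of_take_three hb; simp_all))
      | (rcases hc with hc | hc <;> (have := take_two_of_take_three hc; simp_all))
      | (rcases hd with hd | hd <;> simp_all)
      | simp_all }

theorem rankAt_eq_five_iff (t : List Char) :
    rankAt t = 5 ↔ ['1','b'] <+: t := by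
  constructor
  · intro h
    unfold rankAt at h
    dsimp only at h
    split_ifs at h with h1 h2 h3 h4 h5 h6 <;> try omega
    simpa [List.prefix_iff_eq_take, eq_comm] using h6
  · intro h
    have h2 : t.take 2 = ['1','b'] := by
      simpa [List.prefix_iff_eq_take, eq_comm] using h
    unfold rankAt
    dsimp only
    split_ifs with h1 hb hc hd he <;> try rfl
    all_goals {
      exfalso
      first
      | (rcases h1 with h1 | h1 <;> (have := take_two_of_take_three h1; simp_all))
      | (rcases hb with hb | hb <;> (have := take_two_of_take_three hb; simp_all))
      | (rcases hc with hc | hc <;> (have := take_two_of_take_three hc; simp_all))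
      | (rcases hd with hd | hd <;> simp_all)
      | simp_all }

-- substring present in L ↔ some suffix has that rank
theorem isIn_iff_exists_rank (L : List Char) (p1 : List Char) (k : Nat)
    (hchar : ∀ t : List Char, rankAt t = k ↔ p1 <+: t) :
    PySem.Chars.isIn p1 L = true ↔ ∃ j, rankAt (L.drop j) = k := by
  rw [← PySem.Chars.exists_prefix_drop_iff_isIn]
  constructor
  · rintro ⟨j, hj⟩; exact ⟨j, (hchar _).2 hj⟩
  · rintro ⟨j, hj⟩; exact ⟨j, (hchar _).1 hj⟩

theorem isIn2_iff_exists_rank (L : List Char) (p1 p2 : List Char) (k : Nat)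
    (hchar : ∀ t : List Char, rankAt t = k ↔ (p1 <+: t ∨ p2 <+: t)) :
    (PySem.Chars.isIn p1 L = true ∨ PySem.Chars.isIn p2 L = true) ↔ ∃ j, rankAt (L.drop j) = k := by
  rw [← PySem.Chars.exists_prefix_drop_iff_isIn, ← PySem.Chars.exists_prefix_drop_iff_isIn]
  constructor
  · rintro (⟨j, hj⟩ | ⟨j, hj⟩)
    · exact ⟨j, (hchar _).2 (Or.inl hj)⟩
    · exact ⟨j, (hchar _).2 (Or.inr hj)⟩
  · rintro ⟨j, hj⟩
    rcases (hchar _).1 hj with h | h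
    · exact Or.inl ⟨j, h⟩
    · exact Or.inr ⟨j, h⟩

-- ===== VERDICT (by name: the statement is the Claim_ definition above) =====
theorem estimate_size_spec : Claim_equal_estimate_size := by
  intro model_id _
  unfold Spec_estimate_size estimate_size estimate_size_alt
  dsimp only
  set L := PySem.Chars.lower model_id.toList with hL
  have hlow : (PySem.Str.lower model_id).toList = L := by
    simp [PySem.Str.toList_lower, hL]
  have hIn : ∀ x : String, PySem.Str.isIn x (PySem.Str.lower model_id) = PySem.Chars.isIn x.toList L := by
    intro x
    rw [← hlow]
    simp [PySem.Str.isIn]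
  have hb0 := isIn2_iff_exists_rank L ['7','0','b'] ['7','2','b'] 0 rankAt_eq_zero_iff
  have hb1 := isIn2_iff_exists_rank L ['3','0','b'] ['3','4','b'] 1 rankAt_eq_one_iff
  have hb2 := isIn2_iff_exists_rank L ['1','3','b'] ['1','4','b'] 2 rankAt_eq_two_iff
  have hb3 := isIn2_iff_exists_rank L ['7','b'] ['8','b'] 3 rankAt_eq_three_iff
  have hb4 := isIn_iff_exists_rank L ['3','b'] 4 rankAt_eq_four_iff
  have hb5 := isIn_iff_exists_rank L ['1','b'] 5 rankAt_eq_five_iff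
  have hm6 : minRank L ≤ 6 := le_trans (by simpa using minRank_le_drop L 0) (rankAt_le_six L)
  have hsc : scanBest L 6 = minRank L := by rw [scanBest_eq L 6 (le_refl 6)]; omega
  have hlo : ∀ m, (∃ j, rankAt (L.drop j) = m) → minRank L ≤ m := by
    rintro m ⟨j, hj⟩; exact hj ▸ minRank_le_drop L j
  have hex : ∀ m, minRank L = m → m ≠ 6 → ∃ j, rankAt (L.drop j) = m := by
    intro m hm hne
    rcases minRank_attained L with h | ⟨j, hj⟩
    · exact absurd (by omega : m = 6) hne
    · exact ⟨j, by omega⟩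
  simp only [List.any_cons, List.any_nil, Bool.or_false, hIn, Bool.or_eq_true,
    (by decide : ("70b".toList) = ['7','0','b']), (by decide : ("72b".toList) = ['7','2','b']),
    (by decide : ("30b".toList) = ['3','0','b']), (by decide : ("34b".toList) = ['3','4','b']),
    (by decide : ("13b".toList) = ['1','3','b']), (by decide : ("14b".toList) = ['1','4','b']),
    (by decide : ("7b".toList) = ['7','b']), (by decide : ("8b".toList) = ['8','b']),
    (by decide : ("3b".toList) = ['3','b']), (by decide : ("1b".toList) = ['1','b'])]
  have hcase : minRank L = 0 ∨ minRank L = 1 ∨ minRank L = 2 ∨ minRank L = 3 ∨ minRank L = 4 ∨ minRank L = 5 ∨ minRank L = 6 := by omega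
  rcases hcase with h | h | h | h | h | h | h
  ·
    have t0 := hb0.mpr (hex 0 h (by omega))
    rw [if_pos t0, hsc, h]
    simp [pvSizes]
  ·
    have f0 := fun c => (by omega : ¬(minRank L ≤ 0)) (hlo 0 (hb0.mp c))
    have t1 := hb1.mpr (hex 1 h (by omega))
    rw [if_neg f0, if_pos t1, hsc, h]
    simp [pvSizes]
  ·
    have f0 := fun c => (by omega : ¬(minRank L ≤ 0)) (hlo 0 (hb0.mp c))
    have f1 := fun c => (by omega : ¬(minRank L ≤ 1)) (hlo 1 (hb1.mp c))
    have t2 := hb2.mpr (hex 2 h (by omega))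
    rw [if_neg f0, if_neg f1, if_pos t2, hsc, h]
    simp [pvSizes]
  ·
    have f0 := fun c => (by omega : ¬(minRank L ≤ 0)) (hlo 0 (hb0.mp c))
    have f1 := fun c => (by omega : ¬(minRank L ≤ 1)) (hlo 1 (hb1.mp c))
    have f2 := fun c => (by omega : ¬(minRank L ≤ 2)) (hlo 2 (hb2.mp c))
    have t3 := hb3.mpr (hex 3 h (by omega))
    rw [if_neg f0, if_neg f1, if_neg f2, if_pos t3, hsc, h]
    simp [pvSizes]
  ·
    have f0 := fun c => (by omega : ¬(minRank L ≤ 0)) (hlo 0 (hb0.mp c))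
    have f1 := fun c => (by omega : ¬(minRank L ≤ 1)) (hlo 1 (hb1.mp c))
    have f2 := fun c => (by omega : ¬(minRank L ≤ 2)) (hlo 2 (hb2.mp c))
    have f3 := fun c => (by omega : ¬(minRank L ≤ 3)) (hlo 3 (hb3.mp c))
    have t4 := hb4.mpr (hex 4 h (by omega))
    rw [if_neg f0, if_neg f1, if_neg f2, if_neg f3, if_pos t4, hsc, h]
    simp [pvSizes]
  ·
    have f0 := fun c => (by omega : ¬(minRank L ≤ 0)) (hlo 0 (hb0.mp c))
    have f1 := fun c => (by omega : ¬(minRank L ≤ 1)) (hlo 1 (hb1.mp c))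
    have f2 := fun c => (by omega : ¬(minRank L ≤ 2)) (hlo 2 (hb2.mp c))
    have f3 := fun c => (by omega : ¬(minRank L ≤ 3)) (hlo 3 (hb3.mp c))
    have f4 := fun c => (by omega : ¬(minRank L ≤ 4)) (hlo 4 (hb4.mp c))
    have t5 := hb5.mpr (hex 5 h (by omega))
    rw [if_neg f0, if_neg f1, if_neg f2, if_neg f3, if_neg f4, if_pos t5, hsc, h]
    simp [pvSizes]
  ·
    have f0 := fun c => (by omega : ¬(minRank L ≤ 0)) (hlo 0 (hb0.mp c))
    have f1 := fun c => (by omega : ¬(minRank L ≤ 1)) (hlo 1 (hb1.mp c))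
    have f2 := fun c => (by omega : ¬(minRank L ≤ 2)) (hlo 2 (hb2.mp c))
    have f3 := fun c => (by omega : ¬(minRank L ≤ 3)) (hlo 3 (hb3.mp c))
    have f4 := fun c => (by omega : ¬(minRank L ≤ 4)) (hlo 4 (hb4.mp c))
    have f5 := fun c => (by omega : ¬(minRank L ≤ 5)) (hlo 5 (hb5.mp c))
    rw [if_neg f0, if_neg f1, if_neg f2, if_neg f3, if_neg f4, if_neg f5, hsc, h]
    simp
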